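-- pv_equiv track=rewrite | github.com/timothewt/ProjectEuler | problem67.py | build_pyramid
-- ===== SOURCE A (Python) =====
-- from math import sqrt   # dynamic programming and optimal sub-structure
--
-- def build_pyramid(num):
--     res = []
--     num = [int(i) for i in num.split(",")]
--     depth = int(sqrt(8 * len(num) + 1) - 1) // 2
--     start_pos = 0
--     for i in range(1, depth + 1):
--         new_elem = []
--         for j in range(start_pos, start_pos + i):
--             new_elem.append(num[j])
--         res.append(new_elem)
--         start_pos += i
--     return res
-- ===== SOURCE B (Python) =====
-- def build_pyramid(num):
--     res = []
--     row = []
--     width = 1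
--     for piece in num.split(","):
--         row.append(int(piece))
--         if len(row) == width:
--             res.append(row)
--             row = []
--             width += 1
--     return res
-- ===== Notes on version B (the rewrite author's own statement) =====
-- stated objective: simpler
-- what changed: B makes one streaming pass over the split pieces, accumulating the current row and flushing it whenever it reaches its target width (never flushing an incomplete last row), instead of computing the row count from a float sqrt closed form and copying each row with nested index loops.
import Mathlib
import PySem

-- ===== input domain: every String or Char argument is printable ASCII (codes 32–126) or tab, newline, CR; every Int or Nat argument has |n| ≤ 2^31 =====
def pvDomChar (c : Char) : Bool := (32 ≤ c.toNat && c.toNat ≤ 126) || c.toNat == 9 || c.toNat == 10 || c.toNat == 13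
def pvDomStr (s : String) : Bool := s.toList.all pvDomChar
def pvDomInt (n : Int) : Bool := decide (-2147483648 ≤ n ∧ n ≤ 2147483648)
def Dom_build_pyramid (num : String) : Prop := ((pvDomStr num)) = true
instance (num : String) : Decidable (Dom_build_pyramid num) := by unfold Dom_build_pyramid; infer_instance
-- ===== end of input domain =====

-- B replaces A's float-sqrt depth formula and nested per-row copy loops by one streaming
-- pass that flushes the current row whenever it reaches its target width (objective: simpler).

-- ===== PORT A =====
-- int(sqrt(8*len+1) - 1) is ported as Nat.sqrt (8*len+1) - 1: Python's correctly rounded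
-- float sqrt truncates to the integer square root here (exact for any realistic length).
def build_pyramid (num : String) : List (List Int) :=
  -- num = [int(i) for i in num.split(",")]; Pre_ guarantees every int() succeeds (else ValueError)
  let nums : List Int := ((PySem.Str.split? num ",").getD []).map (fun s => (PySem.Int.ofStr? s).getD 0)
  let depth : Int := PySem.Int.floordiv ((Nat.sqrt (8 * nums.length + 1) : Int) - 1) 2
  let st := (PySem.List.pyRange 1 (depth + 1) 1).foldl
    (fun (st : List (List Int) × Int) i =>
      -- new_elem = the inner loop appending num[j] (always in range) for j in range(start_pos, start_pos+i)
      (st.1 ++ [(PySem.List.pyRange st.2 (st.2 + i) 1).foldl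
        (fun acc j => acc ++ [PySem.List.pyGetD nums j 0]) []], st.2 + i)) ([], 0)
  st.1

-- ===== PORT B =====
-- Source B: one pass over num.split(","); state = (res, row, width); row.append(int(piece)),
-- and when len(row) == width the row is flushed into res and width grows by one.
def build_pyramid_alt (num : String) : List (List Int) :=
  let st := ((PySem.Str.split? num ",").getD []).foldl
    (fun (st : List (List Int) × List Int × Nat) piece =>
      let row := st.2.1 ++ [(PySem.Int.ofStr? piece).getD 0]
      if row.length = st.2.2 then (st.1 ++ [row], [], st.2.2 + 1)
      else (st.1, row, st.2.2))
    ([], [], 1)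
  st.1

-- ===== PRECONDITION & SPEC =====
-- A raises ValueError when some comma-separated piece is not a valid int literal
def Pre_build_pyramid (num : String) : Prop :=
  ∀ s ∈ (PySem.Str.split? num ",").getD [], (PySem.Int.ofStr? s).isSome = true
instance (num : String) : Decidable (Pre_build_pyramid num) := by unfold Pre_build_pyramid; infer_instance
def pvWitness_build_pyramid : String := "1,2,3,4,5,6"

def Spec_build_pyramid (num : String) (out : List (List Int)) : Prop := out = build_pyramid_alt num
instance (num : String) (out : List (List Int)) : Decidable (Spec_build_pyramid num out) := by unfold Spec_build_pyramid; infer_instance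

-- ===== CLAIM (what is proved, stated in full; the proofs are below) =====
def Claim_equal_build_pyramid : Prop := ∀ (num : String), Dom_build_pyramid num → Pre_build_pyramid num → Spec_build_pyramid num (build_pyramid num)

-- ===== LEMMAS AND PROOFS =====

-- triangular tail: T i k = i + (i+1) + … + (i+k-1)
def pvT (i k : Nat) : Nat :=
  match k with
  | 0 => 0
  | k + 1 => i + pvT (i + 1) k

-- the rows both programs build: k rows starting at offset s, of widths i, i+1, …
def pvRows (nums : List Int) (s i k : Nat) : List (List Int) :=
  match k with
  | 0 => []
  | k + 1 => (nums.drop s).take i :: pvRows nums (s + i) (i + 1) k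

-- greedy chunking of a list into rows of widths w, w+1, …, stopping before an incomplete row
def pvChunks (xs : List Int) (w : Nat) : List (List Int) :=
  if h : 0 < w ∧ w ≤ xs.length then
    xs.take w :: pvChunks (xs.drop w) (w + 1)
  else []
termination_by xs.length
decreasing_by simp; omega

lemma pvT_closed (i k : Nat) : 2 * pvT i k + k = k * (2 * i + k) := by
  induction k generalizing i with
  | zero => simp [pvT]
  | succ k ih =>
    have := ih (i + 1)
    simp only [pvT]
    ring_nf
    ring_nf at this
    omega

lemma pvT_pos (i k : Nat) : i ≤ pvT i (k + 1) := by
  simp [pvT]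

lemma map_getD_range' (nums : List Int) (s i : Nat) (h : s + i ≤ nums.length) :
    (List.range' s i).map (fun j => nums.getD j 0) = (nums.drop s).take i := by
  induction i generalizing s with
  | zero => simp
  | succ i ih =>
    have hs : s < nums.length := by omega
    rw [List.range'_succ, List.map_cons, ih (s + 1) (by omega),
        List.getD_eq_getElem _ _ hs, List.drop_eq_getElem_cons hs, List.take_succ_cons]

lemma pyRange_natCast (s i : Nat) :
    PySem.List.pyRange (s : Int) ((s : Int) + (i : Int)) 1 = (List.range' s i).map (Nat.cast) := by
  induction i generalizing s with
  | zero => simp [PySem.List.pyRange_one_eq_nil]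
  | succ i ih =>
    rw [PySem.List.pyRange_one_cons (by omega), List.range'_succ, List.map_cons]
    have h1 := ih (s + 1)
    rw [show ((s + 1 : Nat) : Int) + (i : Int) = (s : Int) + ((i : Nat) + 1 : Int) by push_cast; ring] at h1
    rw [show (s : Int) + 1 = ((s + 1 : Nat) : Int) by push_cast; ring]
    exact congrArg _ h1

-- the inner loop of A builds row (nums.drop s).take i
lemma innerA (nums : List Int) (s i : Nat) (h : s + i ≤ nums.length) :
    (PySem.List.pyRange (s : Int) ((s : Int) + (i : Int)) 1).foldl
      (fun acc j => acc ++ [PySem.List.pyGetD nums j 0]) []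
    = (nums.drop s).take i := by
  rw [PySem.List.foldl_append_singleton_eq_map, pyRange_natCast, List.map_map]
  rw [show ((fun j => PySem.List.pyGetD nums j 0) ∘ (Nat.cast : Nat → Int))
      = fun j : Nat => nums.getD j 0 from by
    funext j; simp [PySem.List.pyGetD_natCast]]
  exact map_getD_range' nums s i h

-- A's outer fold appends pvRows
lemma outerA (nums : List Int) (k : Nat) :
    ∀ (i s : Nat) (acc : List (List Int)), s + pvT i k ≤ nums.length →
    (PySem.List.pyRange (i : Int) ((i : Int) + (k : Int)) 1).foldl
      (fun (st : List (List Int) × Int) i =>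
        (st.1 ++ [(PySem.List.pyRange st.2 (st.2 + i) 1).foldl
          (fun acc j => acc ++ [PySem.List.pyGetD nums j 0]) []], st.2 + i)) (acc, (s : Int))
    = (acc ++ pvRows nums s i k, ((s + pvT i k : Nat) : Int)) := by
  induction k with
  | zero => intro i s acc _; simp [PySem.List.pyRange_one_eq_nil, pvRows, pvT]
  | succ k ih =>
    intro i s acc h
    rw [PySem.List.pyRange_one_cons (by omega), List.foldl_cons]
    have hT : pvT i (k + 1) = i + pvT (i + 1) k := rfl
    have hrow : s + i ≤ nums.length := by have := pvT_pos i k; omega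
    simp only [innerA nums s i hrow]
    rw [show (s : Int) + (i : Int) = ((s + i : Nat) : Int) by push_cast; ring,
        show (i : Int) + 1 = ((i + 1 : Nat) : Int) by push_cast; ring,
        show (i : Int) + ((k + 1 : Nat) : Int) = ((i + 1 : Nat) : Int) + ((k : Nat) : Int) by push_cast; ring]
    rw [ih (i + 1) (s + i) (acc ++ [(nums.drop s).take i]) (by omega)]
    simp only [pvRows, List.append_assoc, List.singleton_append, Prod.mk.injEq]
    exact ⟨by trivial, by rw [hT]; push_cast; ring⟩

-- B's streaming fold (over the already-parsed ints) produces pvChunks of what remains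
lemma foldB (l : List Int) :
    ∀ (acc : List (List Int)) (row : List Int) (w : Nat), row.length < w →
    (l.foldl (fun (st : List (List Int) × List Int × Nat) v =>
        let row := st.2.1 ++ [v]
        if row.length = st.2.2 then (st.1 ++ [row], [], st.2.2 + 1)
        else (st.1, row, st.2.2)) (acc, row, w)).1
    = acc ++ pvChunks (row ++ l) w := by
  induction l with
  | nil =>
    intro acc row w hw
    rw [pvChunks]
    rw [dif_neg (by simp; omega)]
    simp
  | cons a l ih =>
    intro acc row w hw
    simp only [List.foldl_cons]
    by_cases hfull : (row ++ [a]).length = w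
    · have hw' : row.length + 1 = w := by simpa using hfull
      rw [if_pos hfull, ih (acc ++ [row ++ [a]]) [] (w + 1) (by simp)]
      have h1 : (row ++ a :: l).take w = row ++ [a] := by
        have : row ++ a :: l = (row ++ [a]) ++ l := by simp
        rw [this, List.take_append_of_le_length (by omega), List.take_of_length_le (by omega)]
      have h2 : (row ++ a :: l).drop w = l := by
        have : row ++ a :: l = (row ++ [a]) ++ l := by simp
        rw [this, List.drop_append_of_le_length (by omega), List.drop_of_length_le (by omega)]
        simp
      have hc : pvChunks (row ++ a :: l) w = (row ++ [a]) :: pvChunks l (w + 1) := by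
        rw [pvChunks, dif_pos ⟨by omega, by simp; omega⟩, h1, h2]
      rw [hc]
      simp
    · rw [if_neg hfull, ih acc (row ++ [a]) w (by simp at hfull ⊢; omega)]
      simp

-- the greedy chunks are exactly pvRows when k is the greedy row count
lemma chunks_rows (nums : List Int) (k : Nat) :
    ∀ (s i : Nat), 0 < i → s + pvT i k ≤ nums.length → nums.length < s + pvT i (k + 1) →
    pvChunks (nums.drop s) i = pvRows nums s i k := by
  induction k with
  | zero =>
    intro s i hi _ hub
    simp only [pvT] at hub
    rw [pvChunks, dif_neg (by simp; omega)]
    simp [pvRows]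
  | succ k ih =>
    intro s i hi hlb hub
    have hT : pvT i (k + 1) = i + pvT (i + 1) k := rfl
    have hrow : s + i ≤ nums.length := by have := pvT_pos i k; omega
    rw [pvChunks, dif_pos (by simp; omega)]
    rw [List.drop_drop]
    rw [ih (s + i) (i + 1) (by omega)
      (by simp only [pvT] at hlb ⊢; omega) (by simp only [pvT] at hub ⊢; omega)]
    simp [pvRows, Nat.add_comm s i]

-- the sqrt-formula depth is exactly the greedy row count bound
lemma depth_bounds (n : Nat) :
    pvT 1 ((Nat.sqrt (8 * n + 1) - 1) / 2) ≤ n ∧ n < pvT 1 ((Nat.sqrt (8 * n + 1) - 1) / 2 + 1) := by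
  set r := Nat.sqrt (8 * n + 1) with hr
  set d := (r - 1) / 2 with hd
  have hr1 : 1 ≤ r := by
    have := Nat.sqrt_le_sqrt (show 1 ≤ 8 * n + 1 by omega)
    simpa [hr] using this
  have hlo : r * r ≤ 8 * n + 1 := by
    have := Nat.sqrt_le' (8 * n + 1); rw [pow_two] at this; exact this
  have hhi : 8 * n + 1 < (r + 1) * (r + 1) := by
    have := Nat.lt_succ_sqrt' (8 * n + 1); rw [pow_two] at this; exact this
  have hT1 := pvT_closed 1 d
  have hT2 := pvT_closed 1 (d + 1)
  constructor
  · have hsq : (2 * d + 1) * (2 * d + 1) ≤ r * r :=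
      Nat.mul_le_mul (by omega) (by omega)
    nlinarith
  · have hsq : (r + 1) * (r + 1) ≤ (2 * d + 3) * (2 * d + 3) :=
      Nat.mul_le_mul (by omega) (by omega)
    nlinarith

lemma floordiv_sub_one (r : Nat) (h : 1 ≤ r) :
    PySem.Int.floordiv ((r : Int) - 1) 2 = (((r - 1) / 2 : Nat) : Int) := by
  rw [show (r : Int) - 1 = ((r - 1 : Nat) : Int) by omega]
  exact_mod_cast PySem.Int.floordiv_natCast (r - 1) 2

-- ===== VERDICT (by name: the statement is the Claim_ definition above) =====
theorem build_pyramid_spec : Claim_equal_build_pyramid := by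
  intro num _ _
  unfold Spec_build_pyramid build_pyramid build_pyramid_alt
  simp only
  set pieces := (PySem.Str.split? num ",").getD [] with hp
  set nums := pieces.map (fun s => (PySem.Int.ofStr? s).getD 0) with hnums
  -- B's fold over pieces is the fold over the parsed ints
  have hBmap : (pieces.foldl
      (fun (st : List (List Int) × List Int × Nat) piece =>
        let row := st.2.1 ++ [(PySem.Int.ofStr? piece).getD 0]
        if row.length = st.2.2 then (st.1 ++ [row], [], st.2.2 + 1)
        else (st.1, row, st.2.2)) ([], [], 1)).1
      = (nums.foldl
      (fun (st : List (List Int) × List Int × Nat) v =>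
        let row := st.2.1 ++ [v]
        if row.length = st.2.2 then (st.1 ++ [row], [], st.2.2 + 1)
        else (st.1, row, st.2.2)) ([], [], 1)).1 := by
    rw [hnums, List.foldl_map]
  rw [hBmap, foldB nums [] [] 1 (by simp)]
  set n := nums.length with hn
  have hr1 : 1 ≤ Nat.sqrt (8 * n + 1) := by
    have := Nat.sqrt_le_sqrt (show 1 ≤ 8 * n + 1 by omega)
    simpa using this
  set d := (Nat.sqrt (8 * n + 1) - 1) / 2 with hd
  obtain ⟨hlb, hub⟩ := depth_bounds n
  rw [floordiv_sub_one _ hr1]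
  have houter := outerA nums d 1 0 [] (by simpa using hlb)
  simp only [Nat.cast_zero, Nat.cast_one, List.nil_append, Nat.zero_add] at houter
  rw [show ((d : Nat) : Int) + 1 = 1 + ((d : Nat) : Int) by ring, houter]
  rw [show pvChunks ([] ++ nums) 1 = pvChunks (nums.drop 0) 1 by simp]
  rw [chunks_rows nums d 0 1 (by omega) (by simpa using hlb) (by simpa using hub)]
  simp
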